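-- pv_equiv track=rewrite | github.com/JerryHao2001/IB-Related | IB/HW/week1/FirstTestJerryHao.py | find_equal_sum_slice
-- ===== SOURCE A (Python) =====
-- def find_equal_sum_slice(a,b):
--     def getDict(n):
--         temp = {}
--         for i in range(1,len(n)+1):
--             for j in range(0,len(n)+1-i):
--                 temp["{},{}".format(j,j+i-1)] = sum(n[j:j+i])
--         return(temp)
--     dictA,dictB =list(map(getDict,[a,b]))
--     for i,j in dictA.items():
--         for m,n in dictB.items():
--             if j == n:
--                 return [int(k) for k in(i.split(',')+m.split(','))]
-- ===== SOURCE B (Python) =====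
-- def find_equal_sum_slice(a, b):
--     def prefix(n):
--         p = [0]
--         for x in n:
--             p.append(p[-1] + x)
--         return p
--
--     pb = prefix(b)
--     first = {}
--     for i in range(1, len(b) + 1):
--         for j in range(len(b) + 1 - i):
--             s = pb[j + i] - pb[j]
--             if s not in first:
--                 first[s] = (j, j + i - 1)
--
--     pa = prefix(a)
--     for i in range(1, len(a) + 1):
--         for j in range(len(a) + 1 - i):
--             s = pa[j + i] - pa[j]
--             if s in first:
--                 m, n = first[s]
--                 return [j, j + i - 1, m, n]
--     return None
-- ===== Notes on version B (the rewrite author's own statement) =====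
-- stated objective: faster
-- what changed: Replaces the string-keyed dicts of all subarray sums and the quadruple-nested comparison scan with prefix sums plus a single hash map from sum to the first b-slice, so each a-slice is checked by one O(1) lookup.
import Mathlib
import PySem

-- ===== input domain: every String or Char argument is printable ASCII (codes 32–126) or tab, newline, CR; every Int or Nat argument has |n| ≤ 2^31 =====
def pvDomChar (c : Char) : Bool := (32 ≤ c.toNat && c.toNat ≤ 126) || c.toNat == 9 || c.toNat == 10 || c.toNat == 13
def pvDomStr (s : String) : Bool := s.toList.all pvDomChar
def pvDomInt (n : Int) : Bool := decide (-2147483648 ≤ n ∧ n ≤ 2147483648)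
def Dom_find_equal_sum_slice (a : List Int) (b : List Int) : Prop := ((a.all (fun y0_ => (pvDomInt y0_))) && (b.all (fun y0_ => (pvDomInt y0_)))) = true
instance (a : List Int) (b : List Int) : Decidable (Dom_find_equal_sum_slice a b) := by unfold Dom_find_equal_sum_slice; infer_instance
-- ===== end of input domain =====

-- B replaces A's string-keyed dicts of all subarray sums and the quadruple-nested comparison
-- scan by prefix sums and one hash map from sum to the first b-slice (objective: faster,
-- measured).

-- ===== PORT A =====
-- "{},{}".format(j, j+i-1): the two decimal strings joined by ','
def fesKey (j e : Int) : String := PySem.Int.toStr j ++ "," ++ PySem.Int.toStr e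

-- hand port of s.split(',') — a ONE-CHARACTER separator: split at every ',' keeping empty pieces; exact for every string
def fesSplitComma (cs : List Char) : List (List Char) :=
  match cs with
  | [] => [[]]
  | c :: rest =>
    if c = ',' then [] :: fesSplitComma rest
    else
      match fesSplitComma rest with
      | [] => [[c]]
      | p :: ps => (c :: p) :: ps

-- hand port of int(k): exact on the non-empty all-digit strings that reach it (the pieces of "{},{}".format(j, e) with j, e ≥ 0)
def fesDecVal (cs : List Char) : Int := cs.foldl (fun acc c => 10 * acc + ((c.toNat : Int) - 48)) 0

-- A's getDict: temp["{},{}".format(j, j+i-1)] = sum(n[j:j+i]) for i in range(1, len(n)+1), j in range(0, len(n)+1-i)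
def fesGetDict (n : List Int) : PySem.Dict String Int :=
  (PySem.List.pyRange 1 (PySem.List.len n + 1) 1).foldl
    (fun d i => (PySem.List.pyRange 0 (PySem.List.len n + 1 - i) 1).foldl
      (fun d j => d.insert (fesKey j (j + i - 1)) (PySem.List.slice n (some j) (some (j + i))).sum) d)
    PySem.Dict.empty

def find_equal_sum_slice (a : List Int) (b : List Int) : Option (List Int) :=
  let dictA := fesGetDict a
  let dictB := fesGetDict b
  dictA.items.findSome? fun p =>
    dictB.items.findSome? fun q =>
      if p.2 == q.2 then
        some ((fesSplitComma p.1.toList ++ fesSplitComma q.1.toList).map fesDecVal)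
      else none

-- ===== PORT B =====
-- prefix(n): p = [0]; for x in n: p.append(p[-1] + x)   (p[-1] on a never-empty list; pyGetD's default is never used)
def fesPrefix (n : List Int) : List Int :=
  n.foldl (fun p x => p ++ [PySem.List.pyGetD p (-1) 0 + x]) [0]

-- first: map from subarray sum of b to the first (start, end) pair in (length, start) order
-- (pb[j+i], pb[j]: indices always in range, so pyGetD's default is never used)
def fesFirst (b : List Int) : PySem.Dict Int (Int × Int) :=
  let pb := fesPrefix b
  (PySem.List.pyRange 1 (PySem.List.len b + 1) 1).foldl
    (fun d i => (PySem.List.pyRange 0 (PySem.List.len b + 1 - i) 1).foldl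
      (fun d j =>
        let s := PySem.List.pyGetD pb (j + i) 0 - PySem.List.pyGetD pb j 0
        if d.contains s then d else d.insert s (j, j + i - 1)) d)
    PySem.Dict.empty

def find_equal_sum_slice_alt (a : List Int) (b : List Int) : Option (List Int) :=
  let first := fesFirst b
  let pa := fesPrefix a
  (PySem.List.pyRange 1 (PySem.List.len a + 1) 1).findSome? fun i =>
    (PySem.List.pyRange 0 (PySem.List.len a + 1 - i) 1).findSome? fun j =>
      let s := PySem.List.pyGetD pa (j + i) 0 - PySem.List.pyGetD pa j 0
      match first.get? s with
      | some mn => some [j, j + i - 1, mn.1, mn.2]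
      | none => none

-- ===== PRECONDITION & SPEC =====
def Spec_find_equal_sum_slice (a : List Int) (b : List Int) (out : Option (List Int)) : Prop := out = find_equal_sum_slice_alt a b
instance (a : List Int) (b : List Int) (out : Option (List Int)) : Decidable (Spec_find_equal_sum_slice a b out) := by unfold Spec_find_equal_sum_slice; infer_instance

-- ===== CLAIM (what is proved, stated in full; the proofs are below) =====
def Claim_equal_find_equal_sum_slice : Prop := ∀ (a : List Int) (b : List Int), Dom_find_equal_sum_slice a b → Spec_find_equal_sum_slice a b (find_equal_sum_slice a b)

-- ===== LEMMAS AND PROOFS =====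

def fesNatDigits (n : Nat) : List Char :=
  if h : n < 10 then [Nat.digitChar n]
  else fesNatDigits (n / 10) ++ [Nat.digitChar (n % 10)]
  decreasing_by exact Nat.div_lt_self (by omega) (by omega)

theorem fes_toDigitsCore_eq (fuel : Nat) : ∀ (n : Nat) (acc : List Char), n < fuel →
    Nat.toDigitsCore 10 fuel n acc = fesNatDigits n ++ acc := by
  induction fuel with
  | zero => intro n acc h; omega
  | succ f ih =>
    intro n acc h
    rw [Nat.toDigitsCore]
    by_cases h10 : n < 10
    · have : n / 10 = 0 := Nat.div_eq_of_lt h10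
      simp only [this]
      rw [fesNatDigits]
      simp [h10, Nat.mod_eq_of_lt h10]
    · have hne : n / 10 ≠ 0 := by omega
      simp only [if_neg hne]
      rw [ih (n / 10) _ (by omega)]
      rw [show fesNatDigits n = fesNatDigits (n / 10) ++ [Nat.digitChar (n % 10)] from by
        rw [fesNatDigits]; simp [h10]]
      simp

theorem fes_toDigits_eq (n : Nat) : Nat.toDigits 10 n = fesNatDigits n := by
  rw [Nat.toDigits, fes_toDigitsCore_eq (n + 1) n [] (by omega), List.append_nil]

theorem fes_digitChar_ne_comma {m : Nat} (h : m < 10) : Nat.digitChar m ≠ ',' := by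
  interval_cases m <;> decide

theorem fesNatDigits_no_comma (n : Nat) : ',' ∉ fesNatDigits n := by
  induction n using Nat.strong_induction_on with
  | _ n ih =>
    rw [fesNatDigits]
    by_cases h : n < 10
    · simp [h]; exact fun he => fes_digitChar_ne_comma h he.symm
    · simp [h]
      constructor
      · exact ih (n / 10) (Nat.div_lt_self (by omega) (by omega))
      · exact fun he => fes_digitChar_ne_comma (Nat.mod_lt n (by omega)) he.symm

theorem fes_digitChar_toNat {m : Nat} (h : m < 10) : (Nat.digitChar m).toNat = 48 + m := by
  interval_cases m <;> rfl

theorem fesDecVal_append (cs : List Char) (c : Char) :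
    fesDecVal (cs ++ [c]) = 10 * fesDecVal cs + ((c.toNat : Int) - 48) := by
  simp [fesDecVal, List.foldl_append]

theorem fesDecVal_digits (n : Nat) : fesDecVal (fesNatDigits n) = (n : Int) := by
  induction n using Nat.strong_induction_on with
  | _ n ih =>
    rw [fesNatDigits]
    by_cases h : n < 10
    · simp [fesDecVal, h, fes_digitChar_toNat h]
    · simp only [h, dif_neg, not_false_iff]
      rw [fesDecVal_append, ih (n / 10) (Nat.div_lt_self (by omega) (by omega)),
        fes_digitChar_toNat (Nat.mod_lt n (by omega))]
      push_cast
      omega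

theorem fes_toChars_natCast (k : Nat) : PySem.Int.toChars (k : Int) = fesNatDigits k := by
  rw [PySem.Int.toChars]
  simp [fes_toDigits_eq]

theorem fesSplitComma_no_comma (s : List Char) (h : ',' ∉ s) : fesSplitComma s = [s] := by
  induction s with
  | nil => rfl
  | cons c rest ih =>
    have hc : c ≠ ',' := fun he => h (by simp [he])
    rw [fesSplitComma]
    simp only [if_neg hc, ih (fun hm => h (by simp [hm]))]

theorem fesSplitComma_append (s1 s2 : List Char) (h : ',' ∉ s1) :
    fesSplitComma (s1 ++ ',' :: s2) = s1 :: fesSplitComma s2 := by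
  induction s1 with
  | nil => simp [fesSplitComma]
  | cons c rest ih =>
    have hc : c ≠ ',' := fun he => h (by simp [he])
    rw [List.cons_append, fesSplitComma]
    simp only [if_neg hc, ih (fun hm => h (by simp [hm]))]

theorem fesKey_decode (j e : Int) (hj : 0 ≤ j) (he : 0 ≤ e) :
    (fesSplitComma (fesKey j e).toList).map fesDecVal = [j, e] := by
  obtain ⟨j', rfl⟩ : ∃ j' : Nat, j = (j' : Int) := ⟨j.toNat, (Int.toNat_of_nonneg hj).symm⟩
  obtain ⟨e', rfl⟩ : ∃ e' : Nat, e = (e' : Int) := ⟨e.toNat, (Int.toNat_of_nonneg he).symm⟩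
  have : (fesKey (j' : Int) (e' : Int)).toList = fesNatDigits j' ++ ',' :: fesNatDigits e' := by
    rw [fesKey]
    rw [String.toList_append, String.toList_append, PySem.Int.toList_toStr, PySem.Int.toList_toStr,
      fes_toChars_natCast, fes_toChars_natCast]
    simp
  rw [this, fesSplitComma_append _ _ (fesNatDigits_no_comma j'),
    fesSplitComma_no_comma _ (fesNatDigits_no_comma e')]
  simp [fesDecVal_digits]

theorem fesKey_inj {j e j' e' : Int} (hj : 0 ≤ j) (he : 0 ≤ e) (hj' : 0 ≤ j') (he' : 0 ≤ e')
    (h : fesKey j e = fesKey j' e') : j = j' ∧ e = e' := by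
  have := fesKey_decode j e hj he
  rw [h, fesKey_decode j' e' hj' he'] at this
  simp at this; exact ⟨this.1.symm, this.2.symm⟩

def fesIJ (n : List Int) : List (Int × Int) :=
  (PySem.List.pyRange 1 ((n.length : Int) + 1) 1).flatMap fun i =>
    (PySem.List.pyRange 0 ((n.length : Int) + 1 - i) 1).map fun j => (i, j)

def fesS (n : List Int) (i j : Int) : Int := (PySem.List.slice n (some j) (some (j + i))).sum

theorem mem_fesIJ {n : List Int} {p : Int × Int} (h : p ∈ fesIJ n) :
    1 ≤ p.1 ∧ 0 ≤ p.2 ∧ p.2 + p.1 ≤ (n.length : Int) := by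
  rw [fesIJ, List.mem_flatMap] at h
  obtain ⟨i, hi, hp⟩ := h
  rw [List.mem_map] at hp
  obtain ⟨j, hj, rfl⟩ := hp
  rw [PySem.List.mem_pyRange_one] at hi hj
  exact ⟨hi.1, hj.1, by omega⟩

theorem fesIJ_nodup (n : List Int) : (fesIJ n).Nodup := by
  rw [fesIJ, List.nodup_flatMap]
  constructor
  · intro i _
    exact (PySem.List.nodup_pyRange_one _ _).map (fun j j' hjj => by simpa using hjj)
  · have := PySem.List.pairwise_lt_pyRange_one (a := 1) (b := (n.length : Int) + 1)
    apply this.imp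
    intro i i' hlt q hq hq'
    rw [List.mem_map] at hq hq'
    obtain ⟨j, _, rfl⟩ := hq
    obtain ⟨j', _, h2⟩ := hq'
    exact absurd (congrArg Prod.fst h2.symm) (by simp; omega)

theorem fesKeys_nodup (n : List Int) :
    ((fesIJ n).map (fun p => fesKey p.2 (p.2 + p.1 - 1))).Nodup := by
  apply List.Nodup.map_on _ (fesIJ_nodup n)
  intro p hp q hq hkey
  obtain ⟨h1, h2, _⟩ := mem_fesIJ hp
  obtain ⟨h1', h2', _⟩ := mem_fesIJ hq
  have := fesKey_inj h2 (by omega) h2' (by omega) hkey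
  exact Prod.ext (by omega) this.1

theorem fes_findSome?_congr_mem {α β : Type} {l : List α} {f g : α → Option β}
    (h : ∀ x ∈ l, f x = g x) : l.findSome? f = l.findSome? g := by
  induction l with
  | nil => rfl
  | cons x xs ih =>
    simp only [List.findSome?_cons, h x (by simp)]
    cases g x with
    | some v => rfl
    | none => exact ih (fun y hy => h y (by simp [hy]))

theorem fes_find?_congr_mem {α : Type} {l : List α} {f g : α → Bool}
    (h : ∀ x ∈ l, f x = g x) : l.find? f = l.find? g := by
  induction l with
  | nil => rfl
  | cons x xs ih =>
    simp only [List.find?_cons, h x (by simp)]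
    cases g x <;> simp_all [fun y hy => h y (List.mem_cons_of_mem x hy)]

theorem fes_findSome?_flatMap {α β γ : Type} (l : List α) (g : α → List β) (f : β → Option γ) :
    (l.flatMap g).findSome? f = l.findSome? (fun x => (g x).findSome? f) := by
  induction l with
  | nil => rfl
  | cons x xs ih =>
    simp [List.flatMap_cons, List.findSome?_append, ih, List.findSome?_cons]
    cases (g x).findSome? f <;> simp

theorem fesGetDict_eq_foldl (n : List Int) :
    fesGetDict n = (fesIJ n).foldl
      (fun d p => d.insert (fesKey p.2 (p.2 + p.1 - 1)) (fesS n p.1 p.2)) PySem.Dict.empty := by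
  rw [fesGetDict, fesIJ, List.foldl_flatMap]
  simp [List.foldl_map, fesS]

theorem fesGetDict_items (n : List Int) :
    (fesGetDict n).items =
      (fesIJ n).map (fun p => (fesKey p.2 (p.2 + p.1 - 1), fesS n p.1 p.2)) := by
  rw [fesGetDict_eq_foldl,
    PySem.Dict.items_foldl_insert_fresh (fesIJ n) (fun p => fesKey p.2 (p.2 + p.1 - 1))
      (fun p => fesS n p.1 p.2) PySem.Dict.empty
      (fun a _ => by simp [PySem.Dict.contains_empty]) (fesKeys_nodup n)]
  simp [PySem.Dict.empty]

theorem fesA_eq (a b : List Int) :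
    find_equal_sum_slice a b =
      (fesIJ a).findSome? (fun p => (fesIJ b).findSome? (fun q =>
        if fesS a p.1 p.2 == fesS b q.1 q.2 then
          some [p.2, p.2 + p.1 - 1, q.2, q.2 + q.1 - 1]
        else none)) := by
  show (fesGetDict a).items.findSome? _ = _
  rw [fesGetDict_items, fesGetDict_items, List.findSome?_map]
  apply fes_findSome?_congr_mem
  intro p hp
  simp only [Function.comp]
  rw [List.findSome?_map]
  apply fes_findSome?_congr_mem
  intro q hq
  simp only [Function.comp]
  obtain ⟨hp1, hp2, _⟩ := mem_fesIJ hp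
  obtain ⟨hq1, hq2, _⟩ := mem_fesIJ hq
  by_cases h : fesS a p.1 p.2 = fesS b q.1 q.2
  · simp only [h, BEq.rfl, if_true, List.map_append,
      fesKey_decode p.2 (p.2 + p.1 - 1) hp2 (by omega),
      fesKey_decode q.2 (q.2 + q.1 - 1) hq2 (by omega)]
    rfl
  · simp [h]

theorem fes_fold_first_get? {β : Type} (k : β → Int) (v : β → Int × Int) (l : List β) :
    ∀ (d : PySem.Dict Int (Int × Int)) (s : Int),
    (l.foldl (fun d q => if d.contains (k q) then d else d.insert (k q) (v q)) d).get? s =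
      (d.get? s).or ((l.find? (fun q => k q == s)).map v) := by
  induction l with
  | nil => intro d s; simp
  | cons q rest ih =>
    intro d s
    rw [List.foldl_cons, List.find?_cons]
    by_cases hc : d.contains (k q) = true
    · rw [if_pos hc, ih]
      by_cases hks : k q = s
      · have hsome : (d.get? s).isSome := by
          rw [← hks, ← PySem.Dict.contains_eq_isSome_get?, hc]
        obtain ⟨w, hw⟩ := Option.isSome_iff_exists.mp hsome
        simp [hks, hw]
      · simp [show (k q == s) = false from by simp [hks]]
    · rw [if_neg hc, ih]
      by_cases hks : k q = s
      · subst hks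
        rw [PySem.Dict.get?_insert_self]
        have hnone : d.get? (k q) = none := by
          rw [PySem.Dict.get?_eq_none_iff_contains]
          simpa using hc
        simp [hnone]
      · rw [PySem.Dict.get?_insert_of_ne d (v q) (Ne.symm hks)]
        simp [show (k q == s) = false from by simp [hks]]

theorem fesPrefix_aux (l : List Int) : ∀ (acc : List Int) (s : Int), acc.getLast? = some s →
    l.foldl (fun p x => p ++ [PySem.List.pyGetD p (-1) 0 + x]) acc
      = acc ++ (List.range l.length).map (fun k => s + (l.take (k + 1)).sum) := by
  induction l with
  | nil => intro acc s _; simp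
  | cons x l ih =>
    intro acc s hs
    have hne : acc ≠ [] := by intro h; rw [h] at hs; simp at hs
    have hstep : PySem.List.pyGetD acc (-1) 0 = s := by
      rw [PySem.List.pyGetD_neg_one acc 0 hne]
      rw [List.getLast?_eq_some_getLast hne] at hs
      exact Option.some_inj.mp hs
    simp only [List.foldl_cons, hstep]
    rw [ih (acc ++ [s + x]) (s + x) (by simp)]
    rw [List.length_cons, List.range_succ_eq_map]
    simp only [List.map_cons, List.map_map, List.append_assoc, List.singleton_append]
    congr 1
    simp
    intro a _
    ring

theorem fesPrefix_eq (n : List Int) :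
    fesPrefix n = (List.range (n.length + 1)).map (fun k => (n.take k).sum) := by
  rw [fesPrefix, fesPrefix_aux n [0] 0 rfl, List.range_succ_eq_map]
  simp [List.map_map, Function.comp_def]

theorem fesPrefix_getD (n : List Int) (t : Nat) (h : t ≤ n.length) :
    PySem.List.pyGetD (fesPrefix n) (t : Int) 0 = (n.take t).sum := by
  rw [PySem.List.pyGetD_natCast, fesPrefix_eq]
  rw [List.getD_eq_getElem?_getD, List.getElem?_map, List.getElem?_range (by omega)]
  rfl

theorem fesS_prefix (n : List Int) (i j : Int) (h1 : 1 ≤ i) (h2 : 0 ≤ j)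
    (h3 : j + i ≤ (n.length : Int)) :
    PySem.List.pyGetD (fesPrefix n) (j + i) 0 - PySem.List.pyGetD (fesPrefix n) j 0 =
      fesS n i j := by
  obtain ⟨j', rfl⟩ : ∃ j' : Nat, j = (j' : Int) := ⟨j.toNat, (Int.toNat_of_nonneg h2).symm⟩
  obtain ⟨t, ht⟩ : ∃ t : Nat, (j' : Int) + i = (t : Int) :=
    ⟨((j' : Int) + i).toNat, (Int.toNat_of_nonneg (by omega)).symm⟩
  rw [ht, fesPrefix_getD n t (by omega), fesPrefix_getD n j' (by omega)]
  rw [fesS, PySem.List.slice_toNat n (by omega) (by omega)]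
  rw [show ((↑j' + i).toNat) = t from by omega, show ((j' : Int).toNat) = j' from by omega]
  have : t = j' + (t - j') := by omega
  rw [this, List.take_add, List.sum_append]
  simp

theorem fesFirst_eq_foldl (b : List Int) :
    fesFirst b = (fesIJ b).foldl
      (fun d q =>
        if d.contains (PySem.List.pyGetD (fesPrefix b) (q.2 + q.1) 0 -
            PySem.List.pyGetD (fesPrefix b) q.2 0) then d
        else d.insert (PySem.List.pyGetD (fesPrefix b) (q.2 + q.1) 0 -
            PySem.List.pyGetD (fesPrefix b) q.2 0) (q.2, q.2 + q.1 - 1))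
      PySem.Dict.empty := by
  rw [fesFirst, fesIJ, List.foldl_flatMap]
  simp [List.foldl_map]

theorem fesFirst_get? (b : List Int) (s : Int) :
    (fesFirst b).get? s =
      ((fesIJ b).find? (fun q => fesS b q.1 q.2 == s)).map (fun q => (q.2, q.2 + q.1 - 1)) := by
  rw [fesFirst_eq_foldl,
    fes_fold_first_get? (fun q : Int × Int => PySem.List.pyGetD (fesPrefix b) (q.2 + q.1) 0 -
      PySem.List.pyGetD (fesPrefix b) q.2 0) (fun q : Int × Int => (q.2, q.2 + q.1 - 1))]
  rw [show (PySem.Dict.empty : PySem.Dict Int (Int × Int)).get? s = none from rfl]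
  rw [Option.none_or]
  congr 1
  apply fes_find?_congr_mem
  intro q hq
  obtain ⟨h1, h2, h3⟩ := mem_fesIJ hq
  rw [show q.2 + q.1 = q.2 + q.1 from rfl, fesS_prefix b q.1 q.2 h1 h2 (by omega)]

theorem fesB_eq (a b : List Int) :
    find_equal_sum_slice_alt a b =
      (fesIJ a).findSome? (fun p =>
        match ((fesIJ b).find? (fun q => fesS b q.1 q.2 == fesS a p.1 p.2)).map
            (fun q => (q.2, q.2 + q.1 - 1)) with
        | some mn => some [p.2, p.2 + p.1 - 1, mn.1, mn.2]
        | none => none) := by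
  simp only [find_equal_sum_slice_alt]
  rw [show fesIJ a = (PySem.List.pyRange 1 ((a.length : Int) + 1) 1).flatMap
      (fun i => (PySem.List.pyRange 0 ((a.length : Int) + 1 - i) 1).map fun j => (i, j)) from rfl,
    fes_findSome?_flatMap]
  simp only [List.findSome?_map, PySem.List.len_eq]
  apply fes_findSome?_congr_mem
  intro i hi
  apply fes_findSome?_congr_mem
  intro j hj
  rw [PySem.List.mem_pyRange_one] at hi hj
  show (match (fesFirst b).get? (PySem.List.pyGetD (fesPrefix a) (j + i) 0 -
      PySem.List.pyGetD (fesPrefix a) j 0) with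
    | some mn => some [j, j + i - 1, mn.1, mn.2]
    | none => none) = _
  rw [show PySem.List.pyGetD (fesPrefix a) (j + i) 0 - PySem.List.pyGetD (fesPrefix a) j 0 =
      fesS a i j from fesS_prefix a i j (by omega) (by omega) (by omega)]
  rw [fesFirst_get?]
  rfl

theorem fes_findSome?_if_eq_map_find? {α β : Type} (l : List α) (p : α → Bool) (f : α → β) :
    l.findSome? (fun x => if p x then some (f x) else none) = (l.find? p).map f := by
  induction l with
  | nil => rfl
  | cons x xs ih =>
    simp only [List.findSome?_cons, List.find?_cons]
    by_cases h : p x <;> simp [h, ih]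

-- ===== VERDICT (by name: the statement is the Claim_ definition above) =====
theorem find_equal_sum_slice_spec : Claim_equal_find_equal_sum_slice := by
  intro a b _
  show find_equal_sum_slice a b = find_equal_sum_slice_alt a b
  rw [fesA_eq, fesB_eq]
  apply fes_findSome?_congr_mem
  intro p _
  rw [fes_findSome?_if_eq_map_find?]
  rw [fes_find?_congr_mem (g := fun q => fesS b q.1 q.2 == fesS a p.1 p.2)
    (by intro q _; exact Bool.beq_comm)]
  cases (fesIJ b).find? (fun q => fesS b q.1 q.2 == fesS a p.1 p.2) <;> rfl
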